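-- pv_equiv track=rewrite | github.com/gayanthikashankar/adv_pgr | python/set1/q5.py | firstLetters
-- ===== SOURCE A (Python) =====
-- def firstLetters(s):
--     result = ""
--     if len(s) > 0:
--         result += s[0]
--
--     for i in range(1, len(s)):
--         if s[i-1] == ' ' and s[i] != ' ':
--             result += s[i]
--
--     return result
-- ===== SOURCE B (Python) =====
-- import re
--
--
-- def firstLetters(s):
--     # One regex pass: '^.' grabs the first character (re.S so it may be a
--     # newline), '(?<= )[^ ]' grabs every non-space right after a space.
--     return ''.join(re.findall(r'^.|(?<= )[^ ]', s, re.S))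
-- ===== Notes on version B (the rewrite author's own statement) =====
-- stated objective: idiomatic
-- what changed: Replaces the manual index loop over range(1, len(s)) with a single re.findall pass (pattern captures the first character and every non-space following a space) joined into the result; the C regex engine gives a constant-factor speedup.
import Mathlib
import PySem

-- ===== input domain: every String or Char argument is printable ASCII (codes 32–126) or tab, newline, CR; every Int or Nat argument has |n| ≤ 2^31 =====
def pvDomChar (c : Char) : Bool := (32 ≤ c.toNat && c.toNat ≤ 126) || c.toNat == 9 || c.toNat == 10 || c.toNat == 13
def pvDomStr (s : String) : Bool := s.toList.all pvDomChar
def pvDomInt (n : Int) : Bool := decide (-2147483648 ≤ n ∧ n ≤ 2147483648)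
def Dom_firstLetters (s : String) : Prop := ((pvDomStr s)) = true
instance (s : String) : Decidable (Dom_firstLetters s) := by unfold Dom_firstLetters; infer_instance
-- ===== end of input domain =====

-- B replaces A's index loop with a single regex-findall pass (idiomatic; same return value).

-- ===== PORT A =====
-- literal port: result = s[0] if nonempty, then for i in range(1, len(s)) append s[i]
-- when s[i-1]==' ' and s[i]!=' '  (indices are always in range, so pyGetD's default is never used)
def firstLetters (s : String) : String :=
  let cs := s.toList
  let result : List Char := if 0 < cs.length then [PySem.List.pyGetD cs 0 ' '] else []
  let result := (PySem.List.pyRange 1 (cs.length : Int) 1).foldl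
    (fun acc i =>
      if PySem.List.pyGetD cs (i - 1) ' ' = ' ' ∧ PySem.List.pyGetD cs i ' ' ≠ ' '
      then acc ++ [PySem.List.pyGetD cs i ' '] else acc) result
  String.mk result

-- ===== PORT B =====
-- hand port of re.findall(r'^.|(?<= )[^ ]', s, re.S): the engine scans positions left to right;
-- at position 0 the '^.' branch matches the single character there (re.S: any char, including '\n');
-- at position i > 0 the lookbehind branch matches the single char s[i] iff s[i-1] = ' ' and s[i] ≠ ' '.
-- All matches have length 1, so the scan advances one position each step; this recursion, carrying
-- the previous character for the lookbehind, is exact for this pattern.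
def pvReScan (prev : Char) : List Char → List (List Char)
  | [] => []
  | c :: rest => if prev = ' ' ∧ c ≠ ' ' then [c] :: pvReScan c rest else pvReScan c rest

def firstLetters_alt (s : String) : String :=
  let ms : List (List Char) :=
    match s.toList with
    | [] => []
    | c :: rest => [c] :: pvReScan c rest
  String.mk ms.flatten  -- ''.join(matches)

-- ===== PRECONDITION & SPEC =====
def Spec_firstLetters (s : String) (out : String) : Prop := out = firstLetters_alt s
instance (s : String) (out : String) : Decidable (Spec_firstLetters s out) := by unfold Spec_firstLetters; infer_instance

-- ===== CLAIM (what is proved, stated in full; the proofs are below) =====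
def Claim_equal_firstLetters : Prop := ∀ (s : String), Dom_firstLetters s → Spec_firstLetters s (firstLetters s)

-- ===== LEMMAS AND PROOFS =====

-- A's index loop from position k equals B's scan over the suffix, carrying cs[k-1] as the previous char.
theorem pv_loop_eq (cs : List Char) (k : Nat) (hk1 : 1 ≤ k) (hk : k ≤ cs.length)
    (p : Char) (hp : cs[k - 1]? = some p) (acc : List Char) :
    (PySem.List.pyRange (k : Int) (cs.length : Int) 1).foldl
      (fun acc i =>
        if PySem.List.pyGetD cs (i - 1) ' ' = ' ' ∧ PySem.List.pyGetD cs i ' ' ≠ ' '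
        then acc ++ [PySem.List.pyGetD cs i ' '] else acc) acc
    = acc ++ (pvReScan p (cs.drop k)).flatten := by
  induction hn : cs.length - k generalizing k p acc with
  | zero =>
      have hk' : k = cs.length := by omega
      subst hk'
      rw [PySem.List.pyRange_one_eq_nil (by omega)]
      simp [List.drop_length, pvReScan]
  | succ n ih =>
      have hklt : k < cs.length := by omega
      rw [PySem.List.pyRange_one_cons (by exact_mod_cast hklt)]
      have hget : PySem.List.pyGetD cs (k : Int) ' ' = cs[k] := by
        rw [PySem.List.pyGetD_natCast]
        simp [List.getD, hklt]
      have hget1 : PySem.List.pyGetD cs ((k : Int) - 1) ' ' = p := by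
        have : ((k : Int) - 1) = ((k - 1 : Nat) : Int) := by omega
        rw [this, PySem.List.pyGetD_natCast]
        simp [List.getD_eq_getElem?_getD, hp]
      have hdrop : cs.drop k = cs[k] :: cs.drop (k + 1) := List.drop_eq_getElem_cons hklt
      have hcast : (k : Int) + 1 = ((k + 1 : Nat) : Int) := by omega
      have hp' : cs[(k + 1) - 1]? = some cs[k] := by
        simp [hklt]
      simp only [List.foldl_cons, hget, hget1]
      rw [hcast]
      by_cases hcond : p = ' ' ∧ cs[k] ≠ ' '
      · rw [if_pos hcond,
            ih (k + 1) (by omega) (by omega) cs[k] hp' (acc ++ [cs[k]]) (by omega)]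
        rw [hdrop]
        simp [pvReScan, hcond]
      · rw [if_neg hcond, ih (k + 1) (by omega) (by omega) cs[k] hp' acc (by omega)]
        rw [hdrop]
        simp only [pvReScan, if_neg hcond]

-- ===== VERDICT (by name: the statement is the Claim_ definition above) =====
theorem firstLetters_spec : Claim_equal_firstLetters := by
  intro s _
  show firstLetters s = firstLetters_alt s
  unfold firstLetters firstLetters_alt
  cases hcs : s.toList with
  | nil => simp [PySem.List.pyRange_one_eq_nil]
  | cons c rest =>
      simp only [List.length_cons]
      rw [if_pos (by omega)]
      have hp : (c :: rest)[1 - 1]? = some c := rfl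
      have : ((rest.length + 1 : Nat) : Int) = ((c :: rest).length : Int) := by simp
      have hL := pv_loop_eq (c :: rest) 1 le_rfl (by simp) c hp
        [PySem.List.pyGetD (c :: rest) 0 ' ']
      norm_num at hL ⊢
      simp [hL]
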